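-- pv_equiv track=rewrite | github.com/ginatrapani/hashtag-goals | #goals.py | get_goal_prioritized
-- ===== SOURCE A (Python) =====
-- def get_goal_prioritized(goal_projects, project_prioritized):
--     goal_prioritized = {}
--     goals = goal_projects.keys()
--     for goal in goal_projects:
--         for project in project_prioritized:
--             if project in goal_projects[goal]:
--                 if goal not in goal_prioritized:
--                     goal_prioritized[goal] = project_prioritized[project]
--                 else:
--                     goal_prioritized[goal] = goal_prioritized[goal] + project_prioritized[project]
--     return goal_prioritized
-- ===== SOURCE B (Python) =====
-- def get_goal_prioritized(goal_projects, project_prioritized):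
--     # Reverse index: project -> goals (in goal order) whose project list contains it.
--     index = {}
--     for goal, projects in goal_projects.items():
--         for project in dict.fromkeys(projects):
--             index.setdefault(project, []).append(goal)
--     totals = {}
--     for project, priority in project_prioritized.items():
--         for goal in index.get(project, ()):
--             totals[goal] = totals.get(goal, 0) + priority
--     return {goal: totals[goal] for goal in goal_projects if goal in totals}
-- ===== Notes on version B (the rewrite author's own statement) =====
-- stated objective: faster
-- what changed: Replaces A's nested goals-by-projects scan with a linear membership test per pair by a one-pass reverse index (project -> goals containing it, deduped with dict.fromkeys), a single accumulation pass over project_prioritized, and a final reorder to goal order.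
import Mathlib
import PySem

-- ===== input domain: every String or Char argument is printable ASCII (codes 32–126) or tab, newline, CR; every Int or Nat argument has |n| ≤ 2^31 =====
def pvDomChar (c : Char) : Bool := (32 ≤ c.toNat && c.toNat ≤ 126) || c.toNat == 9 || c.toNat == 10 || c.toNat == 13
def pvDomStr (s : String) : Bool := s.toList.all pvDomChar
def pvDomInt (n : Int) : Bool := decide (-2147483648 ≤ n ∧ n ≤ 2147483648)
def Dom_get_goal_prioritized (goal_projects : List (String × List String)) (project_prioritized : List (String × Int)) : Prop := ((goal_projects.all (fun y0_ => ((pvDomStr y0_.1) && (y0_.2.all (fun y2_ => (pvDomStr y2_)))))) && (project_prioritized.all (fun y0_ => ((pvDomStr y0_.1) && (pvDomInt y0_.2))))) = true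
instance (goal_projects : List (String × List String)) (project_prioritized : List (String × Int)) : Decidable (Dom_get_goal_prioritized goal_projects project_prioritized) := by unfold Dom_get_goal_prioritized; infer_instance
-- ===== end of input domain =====

-- B replaces A's nested membership scans by a reverse index project→goals plus one accumulation pass (faster).
-- ===== PORT A =====
-- A iterates the goals dict; `goal_projects[goal]` / `project_prioritized[project]` are lookups on
-- keys that are guaranteed present, ported as getD (exact under Pre_: dict key lists are duplicate-free).
def get_goal_prioritized (goal_projects : List (String × List String)) (project_prioritized : List (String × Int)) : List (String × Int) :=
  let gpd := PySem.Dict.mk goal_projects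
  let ppd := PySem.Dict.mk project_prioritized
  (goal_projects.foldl (fun (acc : PySem.Dict String Int) g =>
    project_prioritized.foldl (fun (acc : PySem.Dict String Int) p =>
      if (gpd.getD g.1 []).contains p.1 then
        if acc.contains g.1 = false then
          acc.insert g.1 (ppd.getD p.1 0)
        else
          acc.insert g.1 (acc.getD g.1 0 + ppd.getD p.1 0)
      else acc) acc) PySem.Dict.empty).items

-- ===== PORT B =====
-- dict.fromkeys(projects) is PySem.List.dedup; setdefault(...).append is insert of getD ++ [goal].
def get_goal_prioritized_alt (goal_projects : List (String × List String)) (project_prioritized : List (String × Int)) : List (String × Int) :=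
  let index := goal_projects.foldl (fun (idx : PySem.Dict String (List String)) g =>
      (PySem.List.dedup g.2).foldl (fun idx p => idx.insert p (idx.getD p [] ++ [g.1])) idx)
    PySem.Dict.empty
  let totals := project_prioritized.foldl (fun (t : PySem.Dict String Int) pr =>
      (index.getD pr.1 []).foldl (fun t goal => t.insert goal (t.getD goal 0 + pr.2)) t)
    PySem.Dict.empty
  goal_projects.filterMap (fun g => (totals.get? g.1).map (fun v => (g.1, v)))

-- ===== PRECONDITION & SPEC =====
-- Pre_ excludes association lists with duplicate keys: both parameters are Python dicts, whose
-- key lists are always duplicate-free, so no Python input is excluded.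
def Pre_get_goal_prioritized (goal_projects : List (String × List String)) (project_prioritized : List (String × Int)) : Prop :=
  (goal_projects.map Prod.fst).Nodup ∧ (project_prioritized.map Prod.fst).Nodup
instance (goal_projects : List (String × List String)) (project_prioritized : List (String × Int)) : Decidable (Pre_get_goal_prioritized goal_projects project_prioritized) := by unfold Pre_get_goal_prioritized; infer_instance
def pvWitness_get_goal_prioritized : (List (String × List String)) × (List (String × Int)) :=
  ([("g1", ["p1", "p2"]), ("g2", ["p2"])], [("p1", 3), ("p2", 5)])

def Spec_get_goal_prioritized (goal_projects : List (String × List String)) (project_prioritized : List (String × Int)) (out : List (String × Int)) : Prop := out = get_goal_prioritized_alt goal_projects project_prioritized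
instance (goal_projects : List (String × List String)) (project_prioritized : List (String × Int)) (out : List (String × Int)) : Decidable (Spec_get_goal_prioritized goal_projects project_prioritized out) := by unfold Spec_get_goal_prioritized; infer_instance

-- ===== CLAIM (what is proved, stated in full; the proofs are below) =====
def Claim_equal_get_goal_prioritized : Prop := ∀ (goal_projects : List (String × List String)) (project_prioritized : List (String × Int)), Dom_get_goal_prioritized goal_projects project_prioritized → Pre_get_goal_prioritized goal_projects project_prioritized → Spec_get_goal_prioritized goal_projects project_prioritized (get_goal_prioritized goal_projects project_prioritized)

-- ===== LEMMAS AND PROOFS =====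

-- Per-goal accumulated priority, as a fold over project_prioritized on an Option Int.
def pvStepO (gpd : PySem.Dict String (List String)) (ppd : PySem.Dict String Int) (goal : String)
    (o : Option Int) (p : String × Int) : Option Int :=
  if (gpd.getD goal []).contains p.1 then some (o.getD 0 + ppd.getD p.1 0) else o

lemma pvStepO_isSome (gpd ppd) (goal : String) (pp : List (String × Int)) (o : Option Int)
    (h : o.isSome) : (pp.foldl (pvStepO gpd ppd goal) o).isSome := by
  induction pp generalizing o with
  | nil => exact h
  | cons p rest ih =>
    simp only [List.foldl_cons]
    apply ih
    unfold pvStepO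
    split <;> simp_all

lemma pv_insert_self {d : PySem.Dict String Int} {k : String} {v : Int}
    (hnd : d.keys.Nodup) (h : d.get? k = some v) : d.insert k v = d := by
  apply PySem.Dict.ext
  rw [PySem.Dict.items_insert_of_contains]
  · conv_rhs => rw [← List.map_id d.items]
    apply List.map_congr_left
    intro p hp
    obtain ⟨k1, v1⟩ := p
    by_cases hk : k1 = k
    · subst hk
      have hv : d.get? k1 = some v1 := PySem.Dict.get?_of_mem_items d hp hnd
      rw [h] at hv
      simp_all
    · simp [hk]
  · rw [PySem.Dict.contains_eq_isSome_get?, h]; rfl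

-- A's inner loop over project_prioritized, characterized by the Option fold.
lemma pvInnerA (gpd : PySem.Dict String (List String)) (ppd : PySem.Dict String Int) (g : String)
    (pp : List (String × Int)) :
    ∀ (acc : PySem.Dict String Int), acc.keys.Nodup →
    pp.foldl (fun (acc : PySem.Dict String Int) p =>
      if (gpd.getD g []).contains p.1 then
        if acc.contains g = false then acc.insert g (ppd.getD p.1 0)
        else acc.insert g (acc.getD g 0 + ppd.getD p.1 0)
      else acc) acc
    = match pp.foldl (pvStepO gpd ppd g) (acc.get? g) with
      | none => acc
      | some v => acc.insert g v := by
  induction pp with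
  | nil =>
    intro acc hnd
    simp only [List.foldl_nil]
    cases h : acc.get? g with
    | none => rfl
    | some v => exact (pv_insert_self hnd h).symm
  | cons p rest ih =>
    intro acc hnd
    simp only [List.foldl_cons]
    by_cases hc : (gpd.getD g []).contains p.1
    · rw [if_pos hc]
      have hstep : pvStepO gpd ppd g (acc.get? g) p = some ((acc.get? g).getD 0 + ppd.getD p.1 0) := by
        unfold pvStepO; rw [if_pos hc]
      rw [hstep]
      cases hget : acc.get? g with
      | none =>
        have hcont : acc.contains g = false := by
          rw [PySem.Dict.contains_eq_isSome_get?, hget]; rfl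
        rw [hcont, if_pos rfl]
        rw [ih _ (PySem.Dict.nodup_keys_insert acc g _ hnd), PySem.Dict.get?_insert_self]
        simp only [Option.getD_none, zero_add]
        have hs := pvStepO_isSome gpd ppd g rest (some (ppd.getD p.1 0)) rfl
        cases hres : rest.foldl (pvStepO gpd ppd g) (some (ppd.getD p.1 0)) with
        | none => rw [hres] at hs; simp at hs
        | some w => simp [PySem.Dict.insert_insert_self]
      | some v0 =>
        have hcont : acc.contains g = true := by
          rw [PySem.Dict.contains_eq_isSome_get?, hget]; rfl
        rw [hcont]
        simp only [Bool.true_eq_false, if_false]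
        rw [ih _ (PySem.Dict.nodup_keys_insert acc g _ hnd), PySem.Dict.get?_insert_self]
        rw [PySem.Dict.getD_eq_get?_getD, hget]
        simp only [Option.getD_some]
        have hs := pvStepO_isSome gpd ppd g rest (some (v0 + ppd.getD p.1 0)) rfl
        cases hres : rest.foldl (pvStepO gpd ppd g) (some (v0 + ppd.getD p.1 0)) with
        | none => rw [hres] at hs; simp at hs
        | some w => simp [PySem.Dict.insert_insert_self]
    · rw [if_neg hc]
      have hstep : pvStepO gpd ppd g (acc.get? g) p = acc.get? g := by
        unfold pvStepO; rw [if_neg hc]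
      rw [hstep]
      exact ih acc hnd

-- A's outer loop appends one entry per matching goal, in goal order.
lemma pvOuterA (gpd : PySem.Dict String (List String)) (ppd : PySem.Dict String Int)
    (pp : List (String × Int)) :
    ∀ (gl : List (String × List String)) (acc : PySem.Dict String Int),
    acc.keys.Nodup → (∀ g ∈ gl, acc.get? g.1 = none) → (gl.map Prod.fst).Nodup →
    (gl.foldl (fun (acc : PySem.Dict String Int) g =>
      pp.foldl (fun (acc : PySem.Dict String Int) p =>
        if (gpd.getD g.1 []).contains p.1 then
          if acc.contains g.1 = false then acc.insert g.1 (ppd.getD p.1 0)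
          else acc.insert g.1 (acc.getD g.1 0 + ppd.getD p.1 0)
        else acc) acc) acc).items
    = acc.items ++ gl.filterMap (fun g => (pp.foldl (pvStepO gpd ppd g.1) none).map (fun v => (g.1, v))) := by
  intro gl
  induction gl with
  | nil => intro acc _ _ _; simp
  | cons g rest ih =>
    intro acc hnd hnone hgl
    simp only [List.foldl_cons, List.filterMap_cons]
    rw [pvInnerA gpd ppd g.1 pp acc hnd]
    rw [hnone g (List.mem_cons_self)]
    have hgl1 : (rest.map Prod.fst).Nodup := (List.nodup_cons.mp hgl).2
    have hgne : ∀ g' ∈ rest, g'.1 ≠ g.1 := by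
      intro g' hg' heq
      exact (List.nodup_cons.mp hgl).1 (heq ▸ List.mem_map_of_mem hg')
    cases hres : pp.foldl (pvStepO gpd ppd g.1) none with
    | none =>
      simp only [Option.map_none]
      exact ih acc hnd (fun g' hg' => hnone g' (List.mem_cons_of_mem _ hg')) hgl1
    | some v =>
      simp only [Option.map_some]
      have hcont : acc.contains g.1 = false := by
        rw [PySem.Dict.contains_eq_isSome_get?, hnone g (List.mem_cons_self)]; rfl
      rw [ih (acc.insert g.1 v) (PySem.Dict.nodup_keys_insert acc g.1 v hnd)
        (fun g' hg' => by
          rw [PySem.Dict.get?_insert_of_ne _ _ (hgne g' hg')]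
          exact hnone g' (List.mem_cons_of_mem _ hg'))
        hgl1]
      rw [PySem.Dict.items_insert_of_not_contains _ _ hcont]
      simp

-- goals (in order) whose project collection contains p
def pvGoalsOf (gl : List (String × List String)) (p : String) : List String :=
  (gl.filter (fun g => g.2.contains p)).map Prod.fst

-- B's per-goal inner index loop (over a duplicate-free project list)
lemma pvInnerIdx (g1 : String) :
    ∀ (D : List String), D.Nodup → ∀ (idx : PySem.Dict String (List String)) (q : String),
    (D.foldl (fun idx p => idx.insert p (idx.getD p [] ++ [g1])) idx).getD q []
    = if q ∈ D then idx.getD q [] ++ [g1] else idx.getD q [] := by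
  intro D
  induction D with
  | nil => intro _ idx q; simp
  | cons p rest ih =>
    intro hnd idx q
    simp only [List.foldl_cons]
    rw [ih (List.nodup_cons.mp hnd).2]
    by_cases hq : q ∈ rest
    · have hne : q ≠ p := fun h => (List.nodup_cons.mp hnd).1 (h ▸ hq)
      rw [if_pos hq, if_pos (List.mem_cons_of_mem _ hq)]
      rw [PySem.Dict.getD_insert_of_ne _ _ _ hne]
    · rw [if_neg hq]
      by_cases hqp : q = p
      · subst hqp
        rw [PySem.Dict.getD_insert_self, if_pos List.mem_cons_self]
      · rw [PySem.Dict.getD_insert_of_ne _ _ _ hqp, if_neg (by simp [hqp, hq])]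

-- B's index characterization: index.get(p, ()) is the ordered list of goals containing p.
lemma pvIndexGetD :
    ∀ (gl : List (String × List String)) (idx : PySem.Dict String (List String)) (q : String),
    (gl.foldl (fun (idx : PySem.Dict String (List String)) g =>
        (PySem.List.dedup g.2).foldl (fun idx p => idx.insert p (idx.getD p [] ++ [g.1])) idx) idx).getD q []
    = idx.getD q [] ++ pvGoalsOf gl q := by
  intro gl
  induction gl with
  | nil => intro idx q; simp [pvGoalsOf]
  | cons g rest ih =>
    intro idx q
    simp only [List.foldl_cons]
    rw [ih]
    have h1 := pvInnerIdx g.1 (PySem.List.dedup g.2) (PySem.List.nodup_dedup g.2)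
    unfold pvGoalsOf
    simp only [List.filter_cons]
    by_cases hq : g.2.contains q
    · have hqm : q ∈ PySem.List.dedup g.2 := (PySem.List.mem_dedup g.2 q).mpr (by simpa using hq)
      rw [h1 _ q, if_pos hqm]
      have hmem : q ∈ g.2 := by simpa using hq
      simp [hmem, List.append_assoc]
    · have hqm : q ∉ PySem.List.dedup g.2 := by
        rw [PySem.List.mem_dedup]; intro hmem; exact hq (by simpa using hmem)
      rw [h1 _ q, if_neg hqm]
      have hmem : q ∉ g.2 := by simpa using hq
      simp [hmem]

-- B's per-project totals update loop (over the duplicate-free goal list of the index)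
lemma pvInnerTot (pr2 : Int) :
    ∀ (L : List String), L.Nodup → ∀ (t : PySem.Dict String Int) (goal : String),
    (L.foldl (fun (t : PySem.Dict String Int) g' => t.insert g' (t.getD g' 0 + pr2)) t).get? goal
    = if goal ∈ L then some (t.getD goal 0 + pr2) else t.get? goal := by
  intro L
  induction L with
  | nil => intro _ t goal; simp
  | cons g' rest ih =>
    intro hnd t goal
    simp only [List.foldl_cons]
    rw [ih (List.nodup_cons.mp hnd).2]
    by_cases hq : goal ∈ rest
    · have hne : goal ≠ g' := fun h => (List.nodup_cons.mp hnd).1 (h ▸ hq)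
      rw [if_pos hq, if_pos (List.mem_cons_of_mem _ hq)]
      rw [PySem.Dict.getD_insert_of_ne _ _ _ hne]
    · rw [if_neg hq]
      by_cases hqp : goal = g'
      · subst hqp
        rw [PySem.Dict.get?_insert_self, if_pos List.mem_cons_self]
      · rw [PySem.Dict.get?_insert_of_ne _ _ hqp, if_neg (by simp [hqp, hq])]

def pvStepB (index : PySem.Dict String (List String)) (goal : String)
    (o : Option Int) (pr : String × Int) : Option Int :=
  if (index.getD pr.1 []).contains goal then some (o.getD 0 + pr.2) else o

-- B's totals loop, per key, as the Option fold.
lemma pvOuterTot (index : PySem.Dict String (List String))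
    (hidx : ∀ p, (index.getD p []).Nodup) :
    ∀ (pl : List (String × Int)) (t : PySem.Dict String Int) (goal : String),
    (pl.foldl (fun (t : PySem.Dict String Int) pr =>
        (index.getD pr.1 []).foldl (fun t g' => t.insert g' (t.getD g' 0 + pr.2)) t) t).get? goal
    = pl.foldl (pvStepB index goal) (t.get? goal) := by
  intro pl
  induction pl with
  | nil => intro t goal; simp
  | cons pr rest ih =>
    intro t goal
    simp only [List.foldl_cons]
    rw [ih]
    congr 1
    rw [pvInnerTot pr.2 _ (hidx pr.1)]
    unfold pvStepB
    by_cases hm : goal ∈ index.getD pr.1 []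
    · rw [if_pos hm, if_pos (show (index.getD pr.1 []).contains goal = true by simpa using hm)]
      rw [PySem.Dict.getD_eq_get?_getD]
    · rw [if_neg hm, if_neg (show ¬(index.getD pr.1 []).contains goal = true by simpa using hm)]

lemma pvGoalsOf_nodup (gl : List (String × List String)) (hnd : (gl.map Prod.fst).Nodup)
    (p : String) : (pvGoalsOf gl p).Nodup := by
  unfold pvGoalsOf
  exact hnd.sublist (List.Sublist.map Prod.fst List.filter_sublist)

-- ===== VERDICT (by name: the statement is the Claim_ definition above) =====
theorem get_goal_prioritized_spec : Claim_equal_get_goal_prioritized := by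
  intro gp pp _ hpre
  obtain ⟨hgp, hpp⟩ := hpre
  unfold Spec_get_goal_prioritized get_goal_prioritized get_goal_prioritized_alt
  -- characterize A
  rw [pvOuterA (PySem.Dict.mk gp) (PySem.Dict.mk pp) pp gp PySem.Dict.empty
      (by simp) (by intro g _; simp [PySem.Dict.get?_empty]) hgp]
  -- characterize B
  have hindex : ∀ q, ((gp.foldl (fun (idx : PySem.Dict String (List String)) g =>
      (PySem.List.dedup g.2).foldl (fun idx p => idx.insert p (idx.getD p [] ++ [g.1])) idx)
      PySem.Dict.empty).getD q []) = pvGoalsOf gp q := by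
    intro q; rw [pvIndexGetD]; simp [PySem.Dict.getD_empty]
  have hidxnd : ∀ p, (((gp.foldl (fun (idx : PySem.Dict String (List String)) g =>
      (PySem.List.dedup g.2).foldl (fun idx p => idx.insert p (idx.getD p [] ++ [g.1])) idx)
      PySem.Dict.empty)).getD p []).Nodup := by
    intro p; rw [hindex]; exact pvGoalsOf_nodup gp hgp p
  apply List.filterMap_congr
  intro g hg
  rw [pvOuterTot _ hidxnd pp PySem.Dict.empty g.1, PySem.Dict.get?_empty]
  congr 1
  apply PySem.List.foldl_congr_mem
  intro o pr hpr
  unfold pvStepO pvStepB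
  have hgpd : (PySem.Dict.mk gp).getD g.1 [] = g.2 :=
    PySem.Dict.getD_of_mem_items (PySem.Dict.mk gp) (by simpa using hg) hgp []
  have hppd : (PySem.Dict.mk pp).getD pr.1 0 = pr.2 :=
    PySem.Dict.getD_of_mem_items (PySem.Dict.mk pp) (by simpa using hpr) hpp 0
  rw [hgpd, hppd, hindex pr.1]
  have hcond : (pvGoalsOf gp pr.1).contains g.1 = g.2.contains pr.1 := by
    by_cases hm : g.2.contains pr.1
    · rw [hm]
      have : g.1 ∈ pvGoalsOf gp pr.1 := by
        unfold pvGoalsOf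
        exact List.mem_map_of_mem (List.mem_filter.mpr ⟨hg, hm⟩)
      simpa using this
    · simp only [Bool.not_eq_true] at hm
      rw [hm]
      by_contra hc
      simp only [Bool.not_eq_false] at hc
      obtain ⟨g', hg', heq⟩ := List.mem_map.mp (show g.1 ∈ pvGoalsOf gp pr.1 by simpa using hc)
      have hg'mem := (List.mem_filter.mp hg').1
      have hg'c := (List.mem_filter.mp hg').2
      -- g'.1 = g.1 and nodup keys force g' = g
      have : g' = g := List.inj_on_of_nodup_map hgp hg'mem hg heq
      rw [this] at hg'c
      simp_all
  rw [hcond]
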